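-- pv_equiv track=rewrite | github.com/leesoongin/Python_Algorithm | 프로그래머스/모의고사_완전탐색_2.py | solution
-- ===== SOURCE A (Python) =====
-- from itertools import cycle
--
-- def solution(answers):
--     answer = []
--
--     one_arr = [1,2,3,4,5]
--     two_arr = [2,1,2,3,2,4,2,5]
--     three_arr = [3,3,1,1,2,2,4,4,5,5]
--     answer_count_arr = [0,0,0]
--
--     for (one,two,three,item) in zip(cycle(one_arr),cycle(two_arr),cycle(three_arr),answers):
--         if one == item:
--             answer_count_arr[0] += 1
--         if two == item:
--             answer_count_arr[1] += 1
--         if three == item: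
--             answer_count_arr[2] += 1
--
--     for (index,item) in enumerate(answer_count_arr):
--         if item == max(answer_count_arr):
--             answer.append(index+1)
--
--     return answer
-- ===== SOURCE B (Python) =====
-- def solution(answers):
--     # Histogram approach: one pass builds a frequency table keyed by
--     # (position mod 40, answer) -- 40 = common period of the three patterns.
--     # Each pattern's score is then 40 table lookups, independent of len(answers).
--     freq = {}
--     for i, a in enumerate(answers):
--         key = (i % 40, a)
--         freq[key] = freq.get(key, 0) + 1
--     patterns = [[1, 2, 3, 4, 5], [2, 1, 2, 3, 2, 4, 2, 5], [3, 3, 1, 1, 2, 2, 4, 4, 5, 5]]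
--     counts = [sum(freq.get((r, p[r % len(p)]), 0) for r in range(40)) for p in patterns]
--     best = max(counts)
--     return [k + 1 for k, c in enumerate(counts) if c == best]
-- ===== Notes on version B (the rewrite author's own statement) =====
-- stated objective: alternative
-- what changed: Instead of scoring patterns by scanning the answers (A's combined zip/cycle counting loop), B builds a histogram keyed by (index mod 40, answer) in one pass over the answers and then scores each pattern with 40 histogram lookups over the common period, no further scan of the answers.
import Mathlib
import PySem

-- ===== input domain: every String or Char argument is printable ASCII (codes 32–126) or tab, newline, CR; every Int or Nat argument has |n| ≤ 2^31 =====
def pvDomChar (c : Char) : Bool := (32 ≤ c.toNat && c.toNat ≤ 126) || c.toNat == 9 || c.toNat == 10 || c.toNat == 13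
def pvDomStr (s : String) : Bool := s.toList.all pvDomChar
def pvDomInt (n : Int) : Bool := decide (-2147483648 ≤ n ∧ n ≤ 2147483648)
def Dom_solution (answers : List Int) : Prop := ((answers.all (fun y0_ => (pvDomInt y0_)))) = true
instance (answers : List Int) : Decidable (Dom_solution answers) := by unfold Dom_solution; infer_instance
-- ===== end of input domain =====

-- B replaces A's combined zip/cycle counting scan with a histogram over (index mod 40, answer)
-- built in one pass, from which each pattern's score is read off by 40 lookups (alternative).

-- ===== PORT A =====
-- zip(cycle(one_arr), cycle(two_arr), cycle(three_arr), answers) is ported as a fold over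
-- enumerate answers, reading each cycled pattern at position i % len (exact: the k-th
-- element of cycle(p) is p[k % len(p)]).
def solution (answers : List Int) : List Int :=
  let one_arr : List Int := [1, 2, 3, 4, 5]
  let two_arr : List Int := [2, 1, 2, 3, 2, 4, 2, 5]
  let three_arr : List Int := [3, 3, 1, 1, 2, 2, 4, 4, 5, 5]
  let cnt : Int × Int × Int :=
    (PySem.List.enumerate answers).foldl
      (fun (c : Int × Int × Int) p =>
        let c1 := if PySem.List.pyGetD one_arr (p.1 % 5) 0 == p.2 then c.1 + 1 else c.1
        let c2 := if PySem.List.pyGetD two_arr (p.1 % 8) 0 == p.2 then c.2.1 + 1 else c.2.1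
        let c3 := if PySem.List.pyGetD three_arr (p.1 % 10) 0 == p.2 then c.2.2 + 1 else c.2.2
        (c1, c2, c3)) (0, 0, 0)
  let answer_count_arr : List Int := [cnt.1, cnt.2.1, cnt.2.2]
  (PySem.List.enumerate answer_count_arr).foldl
    (fun acc p =>
      if p.2 == (PySem.List.max? answer_count_arr (fun y => y)).getD 0
      then acc ++ [p.1 + 1] else acc) []

-- ===== PORT B =====
-- freq[key] = freq.get(key, 0) + 1 over enumerate answers, key = (i % 40, a)
def freqTable (answers : List Int) : PySem.Dict (Int × Int) Int :=
  (PySem.List.enumerate answers).foldl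
    (fun d p => d.insert (p.1 % 40, p.2) (d.getD (p.1 % 40, p.2) 0 + 1)) PySem.Dict.empty

-- sum(freq.get((r, p[r % len(p)]), 0) for r in range(40))
def patScore (freq : PySem.Dict (Int × Int) Int) (pat : List Int) : Int :=
  ((PySem.List.pyRange 0 40 1).map
    (fun r => freq.getD (r, PySem.List.pyGetD pat (r % (pat.length : Int)) 0) 0)).sum

def solution_alt (answers : List Int) : List Int :=
  let freq := freqTable answers
  let patterns : List (List Int) :=
    [[1, 2, 3, 4, 5], [2, 1, 2, 3, 2, 4, 2, 5], [3, 3, 1, 1, 2, 2, 4, 4, 5, 5]]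
  let counts : List Int := patterns.map (patScore freq)
  let best := (PySem.List.max? counts (fun y => y)).getD 0
  ((PySem.List.enumerate counts).filter (fun q => q.2 == best)).map (fun q => q.1 + 1)

-- ===== PRECONDITION & SPEC =====
def Spec_solution (answers : List Int) (out : List Int) : Prop := out = solution_alt answers
instance (answers : List Int) (out : List Int) : Decidable (Spec_solution answers out) := by unfold Spec_solution; infer_instance

-- ===== CLAIM (what is proved, stated in full; the proofs are below) =====
def Claim_equal_solution : Prop := ∀ (answers : List Int), Dom_solution answers → Spec_solution answers (solution answers)

-- ===== LEMMAS AND PROOFS =====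

-- A's combined counting fold equals the three independent filter-counts.
theorem foldl_three_counts (p1 p2 p3 : Int × Int → Bool) (l : List (Int × Int)) (c : Int × Int × Int) :
    l.foldl
      (fun (c : Int × Int × Int) p =>
        (if p1 p then c.1 + 1 else c.1,
         if p2 p then c.2.1 + 1 else c.2.1,
         if p3 p then c.2.2 + 1 else c.2.2)) c
    = (c.1 + ((l.countP p1 : Nat) : Int),
       c.2.1 + ((l.countP p2 : Nat) : Int),
       c.2.2 + ((l.countP p3 : Nat) : Int)) := by
  induction l generalizing c with
  | nil => simp
  | cons x t ih =>
    simp only [List.foldl_cons, ih, List.countP_cons]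
    obtain ⟨a, b, d⟩ := c
    split_ifs <;> simp <;> omega

-- summing an indicator concentrated at one point m of the range picks out g m
theorem sum_map_range_single (lo hi m : Int) (g : Int → Int) (h1 : lo ≤ m) (h2 : m < hi) :
    ((PySem.List.pyRange lo hi 1).map (fun r => if r = m then g r else 0)).sum = g m := by
  rw [PySem.List.pyRange_one_append lo m hi h1 (by omega),
      PySem.List.pyRange_one_cons h2]
  simp only [List.map_append, List.sum_append, List.map_cons, List.sum_cons]
  have hlow : ((PySem.List.pyRange lo m 1).map (fun r => if r = m then g r else 0)).sum = 0 := by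
    apply List.sum_eq_zero
    intro x hx
    obtain ⟨r, hr, rfl⟩ := List.mem_map.mp hx
    have := (PySem.List.mem_pyRange_one).mp hr
    simp [show r ≠ m by omega]
  have hhigh : ((PySem.List.pyRange (m+1) hi 1).map (fun r => if r = m then g r else 0)).sum = 0 := by
    apply List.sum_eq_zero
    intro x hx
    obtain ⟨r, hr, rfl⟩ := List.mem_map.mp hx
    have := (PySem.List.mem_pyRange_one).mp hr
    simp [show r ≠ m by omega]
  rw [hlow, hhigh]; simp

-- key lemma: the 40 histogram lookups for a pattern recover A's match count over the answers
theorem patScore_eq (pat : List Int) (hdvd : (pat.length : Int) ∣ 40) (answers : List Int) (s : Int) (hs : 0 ≤ s) :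
    ((PySem.List.pyRange 0 40 1).map
      (fun r => ((((PySem.List.enumerate answers s).map (fun p => (p.1 % 40, p.2))).count
                   (r, PySem.List.pyGetD pat (r % (pat.length : Int)) 0) : Nat) : Int))).sum
    = (((PySem.List.enumerate answers s).countP
        (fun q => PySem.List.pyGetD pat (q.1 % (pat.length : Int)) 0 == q.2) : Nat) : Int) := by
  induction answers generalizing s with
  | nil => simp [PySem.List.enumerate]
  | cons a t ih =>
    rw [PySem.List.enumerate_cons]
    simp only [List.map_cons, List.countP_cons]
    have hmod40 : (0:Int) ≤ s % 40 ∧ s % 40 < 40 := ⟨Int.emod_nonneg s (by norm_num), Int.emod_lt_of_pos s (by norm_num)⟩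
    have hred : s % (pat.length : Int) = (s % 40) % (pat.length : Int) :=
      (Int.emod_emod_of_dvd s hdvd).symm
    have hsplit : ∀ r : Int,
        (((((s % 40, a) : Int × Int) ::
            (PySem.List.enumerate t (s+1)).map (fun p => (p.1 % 40, p.2))).count
           (r, PySem.List.pyGetD pat (r % (pat.length : Int)) 0) : Nat) : Int)
        = ((((PySem.List.enumerate t (s+1)).map (fun p => (p.1 % 40, p.2))).count
             (r, PySem.List.pyGetD pat (r % (pat.length : Int)) 0) : Nat) : Int)
          + (if r = s % 40 then
               (if PySem.List.pyGetD pat ((s % 40) % (pat.length : Int)) 0 == a then (1:Int) else 0)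
             else 0) := by
      intro r
      rw [List.count_cons]
      by_cases hr : r = s % 40
      · subst hr
        by_cases ha : PySem.List.pyGetD pat ((s % 40) % (pat.length : Int)) 0 == a
        · have : ((s % 40, a) : Int × Int) == (s % 40, PySem.List.pyGetD pat ((s % 40) % (pat.length : Int)) 0) := by
            simp_all [beq_iff_eq]
          simp [this, ha]
        · have : ¬ (((s % 40, a) : Int × Int) == (s % 40, PySem.List.pyGetD pat ((s % 40) % (pat.length : Int)) 0)) := by
            simp_all [beq_iff_eq]
            omega
          simp [this, ha]
      · have : ¬ (((s % 40, a) : Int × Int) == (r, PySem.List.pyGetD pat (r % (pat.length : Int)) 0)) := by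
          simp [Prod.ext_iff, beq_iff_eq]
          intro h; omega
        simp [this, hr]
    calc ((PySem.List.pyRange 0 40 1).map _).sum
        = ((PySem.List.pyRange 0 40 1).map
            (fun r => ((((PySem.List.enumerate t (s+1)).map (fun p => (p.1 % 40, p.2))).count
                         (r, PySem.List.pyGetD pat (r % (pat.length : Int)) 0) : Nat) : Int)
                      + (if r = s % 40 then
                           (if PySem.List.pyGetD pat ((s % 40) % (pat.length : Int)) 0 == a then (1:Int) else 0)
                         else 0))).sum := by
          apply congrArg
          apply List.map_congr_left
          intro r _
          exact hsplit r
      _ = _ := by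
          rw [PySem.List.sum_map_add_int, ih (s+1) (by omega),
              sum_map_range_single 0 40 (s % 40) _ hmod40.1 hmod40.2]
          rw [← hred]
          split_ifs <;> push_cast <;> ring

-- the histogram lookup is the pair count (the fold keyed by p ↦ (p.1 % 40, p.2) is a counter)
theorem getD_foldl_insert_key (l : List (Int × Int)) (d : PySem.Dict (Int × Int) Int) (v : Int × Int) :
    (l.foldl (fun d p => d.insert (p.1 % 40, p.2) (d.getD (p.1 % 40, p.2) 0 + 1)) d).getD v 0
    = d.getD v 0 + ((l.map (fun p => (p.1 % 40, p.2))).count v : Int) := by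
  induction l generalizing d with
  | nil => simp
  | cons x t ih =>
    rw [List.foldl_cons, ih, List.map_cons, List.count_cons]
    by_cases hx : ((x.1 % 40, x.2) : Int × Int) == v
    · have hv : v = (x.1 % 40, x.2) := (beq_iff_eq.mp hx).symm
      subst hv
      rw [PySem.Dict.getD_insert_self]
      simp; ring
    · have hne : v ≠ (x.1 % 40, x.2) := fun h => hx (by simp [h])
      rw [PySem.Dict.getD_insert_of_ne d _ _ hne]
      simp [hx]

theorem freqTable_getD (answers : List Int) (v : Int × Int) :
    (freqTable answers).getD v 0
    = (((PySem.List.enumerate answers).map (fun p => (p.1 % 40, p.2))).count v : Int) := by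
  unfold freqTable
  rw [getD_foldl_insert_key]
  simp [PySem.Dict.empty, PySem.Dict.getD, PySem.Dict.get?]

-- B's pattern score equals A's match count
theorem patScore_eq_countP (pat : List Int) (hdvd : (pat.length : Int) ∣ 40) (answers : List Int) :
    patScore (freqTable answers) pat
    = (((PySem.List.enumerate answers).countP
        (fun q => PySem.List.pyGetD pat (q.1 % (pat.length : Int)) 0 == q.2) : Nat) : Int) := by
  unfold patScore
  have := patScore_eq pat hdvd answers 0 le_rfl
  rw [← this]
  apply congrArg
  apply List.map_congr_left
  intro r _
  rw [freqTable_getD]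

-- ===== VERDICT (by name: the statement is the Claim_ definition above) =====
theorem solution_spec : Claim_equal_solution := by
  intro answers _
  show solution answers = solution_alt answers
  unfold solution solution_alt
  simp only [List.map_cons, List.map_nil]
  rw [show (fun (c : Int × Int × Int) (p : Int × Int) =>
        let c1 := if PySem.List.pyGetD [1, 2, 3, 4, 5] (p.1 % 5) 0 == p.2 then c.1 + 1 else c.1
        let c2 := if PySem.List.pyGetD [2, 1, 2, 3, 2, 4, 2, 5] (p.1 % 8) 0 == p.2 then c.2.1 + 1 else c.2.1
        let c3 := if PySem.List.pyGetD [3, 3, 1, 1, 2, 2, 4, 4, 5, 5] (p.1 % 10) 0 == p.2 then c.2.2 + 1 else c.2.2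
        (c1, c2, c3))
      = (fun (c : Int × Int × Int) (p : Int × Int) =>
        ((if (fun p : Int × Int => PySem.List.pyGetD [1, 2, 3, 4, 5] (p.1 % 5) 0 == p.2) p then c.1 + 1 else c.1),
         (if (fun p : Int × Int => PySem.List.pyGetD [2, 1, 2, 3, 2, 4, 2, 5] (p.1 % 8) 0 == p.2) p then c.2.1 + 1 else c.2.1),
         (if (fun p : Int × Int => PySem.List.pyGetD [3, 3, 1, 1, 2, 2, 4, 4, 5, 5] (p.1 % 10) 0 == p.2) p then c.2.2 + 1 else c.2.2))) from rfl,
     foldl_three_counts]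
  rw [patScore_eq_countP [1, 2, 3, 4, 5] (by norm_num) answers,
      patScore_eq_countP [2, 1, 2, 3, 2, 4, 2, 5] (by norm_num) answers,
      patScore_eq_countP [3, 3, 1, 1, 2, 2, 4, 4, 5, 5] (by norm_num) answers,
      PySem.List.foldl_append_if (f := fun p : Int × Int => p.1 + 1)]
  norm_num
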